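-- pv_equiv track=rewrite | github.com/miliar/Code_Jam_Webscraper | solutions_python/Problem_201/1838.py | marca
-- ===== SOURCE A (Python) =====
-- def marca(n):
--     ainit=0
--     init=0
--     final=0
--     for x in range(len(n)):
--         if n[x]=='1':
--             if x-ainit>final-init:
--                 init=ainit
--                 final=x
--             ainit=x
--     y=(final+init)//2
--     n[y]='1'
--     return n
-- ===== SOURCE B (Python) =====
-- def marca(n):
--     def best(i, ref):
--         # best gap among '1's at index >= i, reference = previous '1' (or sentinel 0);
--         # combined on the way back out, ties going to the earlier gap
--         try:
--             j = n.index('1', i)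
--         except ValueError:
--             return (ref, ref)
--         rest = best(j + 1, j)
--         cur = (ref, j)
--         return rest if rest[1] - rest[0] > cur[1] - cur[0] else cur
--     init, final = best(0, 0)
--     n[(init + final) // 2] = '1'
--     return n
-- ===== Notes on version B (the rewrite author's own statement) =====
-- stated objective: alternative
-- what changed: A runs an elementwise state machine over every index keeping (previous '1', best gap) in mutable state; B recursively jumps from one '1' to the next with list.index and combines the leading gap with the recursively computed best of the remainder on the way back out, ties going to the earlier gap.
import Mathlib
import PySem

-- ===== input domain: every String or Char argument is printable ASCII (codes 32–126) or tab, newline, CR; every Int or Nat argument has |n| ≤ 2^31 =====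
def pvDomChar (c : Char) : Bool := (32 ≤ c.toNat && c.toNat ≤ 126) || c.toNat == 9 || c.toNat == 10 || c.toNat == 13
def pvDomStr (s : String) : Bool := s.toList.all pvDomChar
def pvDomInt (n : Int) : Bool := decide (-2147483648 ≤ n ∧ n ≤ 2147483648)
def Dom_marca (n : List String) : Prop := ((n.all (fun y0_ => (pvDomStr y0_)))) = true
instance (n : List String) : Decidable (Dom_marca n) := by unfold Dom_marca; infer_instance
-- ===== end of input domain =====

-- B replaces A's elementwise index loop with mutable state by a recursion that jumps from one
-- '1' to the next (list.index) and combines gaps on the way back out; equivalence is about the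
-- return value (both Pythons also mutate n identically in place).

-- ===== PORT A =====
def marca (n : List String) : List String :=
  let st := (PySem.List.pyRange 0 (n.length : Int) 1).foldl
    (fun (s : Int × Int × Int) x =>
      if PySem.List.pyGetD n x "" == "1" then
        if x - s.1 > s.2.2 - s.2.1 then (x, s.1, x) else (x, s.2.1, s.2.2)
      else s)
    ((0 : Int), (0 : Int), (0 : Int))
  PySem.List.pySetD n (PySem.Int.floordiv (st.2.2 + st.2.1) 2) "1"

-- ===== PORT B =====
-- n.index('1', i) as an Option (none = ValueError); fuel n.length - i only makes it total
def marcaFind (n : List String) (i : Nat) (fuel : Nat) : Option Nat :=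
  match fuel with
  | 0 => none
  | fuel + 1 =>
    if _ : i < n.length then
      if n[i] = "1" then some i else marcaFind n (i + 1) fuel
    else none

-- best(i, ref) of Source B: best gap among '1's at index ≥ i, combined back-to-front;
-- the fuel argument only makes the recursion structural (n.length + 1 - i always suffices)
def marcaBest (n : List String) (i : Nat) (ref : Int) (fuel : Nat) : Int × Int :=
  match fuel with
  | 0 => (ref, ref)
  | fuel + 1 =>
    match marcaFind n i (n.length - i) with
    | none => (ref, ref)
    | some j =>
      let rest := marcaBest n (j + 1) (j : Int) fuel
      let cur : Int × Int := (ref, (j : Int))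
      if rest.2 - rest.1 > cur.2 - cur.1 then rest else cur

def marca_alt (n : List String) : List String :=
  let st := marcaBest n 0 0 (n.length + 1)
  PySem.List.pySetD n (PySem.Int.floordiv (st.1 + st.2) 2) "1"

-- ===== PRECONDITION & SPEC =====
-- Pre_ excludes only the empty list, on which Python's n[y]='1' raises IndexError (in both A and B).
def Pre_marca (n : List String) : Prop := n ≠ []
instance (n : List String) : Decidable (Pre_marca n) := by unfold Pre_marca; infer_instance
def pvWitness_marca : List String := ["0", "1", "0", "0", "1"]
def Spec_marca (n : List String) (out : List String) : Prop := out = marca_alt n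
instance (n : List String) (out : List String) : Decidable (Spec_marca n out) := by unfold Spec_marca; infer_instance

-- ===== CLAIM (what is proved, stated in full; the proofs are below) =====
def Claim_equal_marca : Prop := ∀ (n : List String), Dom_marca n → Pre_marca n → Spec_marca n (marca n)

-- ===== LEMMAS AND PROOFS =====

theorem marcaFind_none_of_le (n : List String) (i fuel : Nat) (h : n.length ≤ i) :
    marcaFind n i fuel = none := by
  cases fuel with
  | zero => rfl
  | succ f => simp [marcaFind, Nat.not_lt.2 h]

theorem marcaFind_bounds (n : List String) (i fuel j : Nat) (h : marcaFind n i fuel = some j) :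
    i ≤ j ∧ j < n.length := by
  induction fuel generalizing i with
  | zero => cases h
  | succ f ih =>
    rw [marcaFind] at h
    split at h
    · split at h
      · cases h; omega
      · have := ih (i + 1) h; omega
    · cases h

theorem marcaBest_none {n : List String} {i : Nat} (ref : Int) (f : Nat)
    (h : marcaFind n i (n.length - i) = none) : marcaBest n i ref (f + 1) = (ref, ref) := by
  simp [marcaBest, h]

theorem marcaBest_some {n : List String} {i j : Nat} (ref : Int) (f : Nat)
    (h : marcaFind n i (n.length - i) = some j) :
    marcaBest n i ref (f + 1) =
      (if (marcaBest n (j + 1) (j : Int) f).2 - (marcaBest n (j + 1) (j : Int) f).1 > (j : Int) - ref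
       then marcaBest n (j + 1) (j : Int) f else (ref, (j : Int))) := by
  simp [marcaBest, h]

-- the result does not depend on the fuel, as long as it exceeds the remaining length
theorem marcaBest_fuel (n : List String) (i : Nat) (ref : Int) (f1 f2 : Nat)
    (h1 : n.length - i < f1) (h2 : n.length - i < f2) :
    marcaBest n i ref f1 = marcaBest n i ref f2 := by
  induction f1 generalizing i ref f2 with
  | zero => omega
  | succ f ih =>
    cases f2 with
    | zero => omega
    | succ g =>
      cases hf : marcaFind n i (n.length - i) with
      | none => rw [marcaBest_none ref f hf, marcaBest_none ref g hf]
      | some j =>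
        have hb := marcaFind_bounds n i _ j hf
        rw [marcaBest_some ref f hf, marcaBest_some ref g hf,
          ih (j + 1) (j : Int) g (by omega) (by omega)]

-- A's pass over the remaining indices, from state (ref, i0, f0), lands on B's recursive best
-- combined against (i0, f0) with strict '>' (earlier gap wins ties).
theorem marca_main (n : List String) (i : Nat) (ref i0 f0 : Int) (h0 : i0 ≤ f0) :
    ((PySem.List.pyRange (i : Int) (n.length : Int) 1).foldl
      (fun (s : Int × Int × Int) x =>
        if PySem.List.pyGetD n x "" == "1" then
          if x - s.1 > s.2.2 - s.2.1 then (x, s.1, x) else (x, s.2.1, s.2.2)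
        else s) (ref, i0, f0)).2
    = (if (marcaBest n i ref (n.length + 1 - i)).2 - (marcaBest n i ref (n.length + 1 - i)).1 > f0 - i0
       then marcaBest n i ref (n.length + 1 - i) else (i0, f0)) := by
  by_cases hlen : i < n.length
  · have hg : PySem.List.pyGetD n (i : Int) "" = n[i] := by
      rw [PySem.List.pyGetD_natCast]; exact List.getD_eq_getElem n "" hlen
    have hfuel : n.length + 1 - i = (n.length - i) + 1 := by omega
    have hfind : n.length - i = (n.length - (i + 1)) + 1 := by omega
    rw [PySem.List.pyRange_one_cons (by exact_mod_cast hlen), List.foldl_cons]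
    have hstep : ((i : Int) + 1) = ((i + 1 : Nat) : Int) := by push_cast; ring
    by_cases hv : n[i] = "1"
    · have hf : marcaFind n i (n.length - i) = some i := by
        rw [hfind, marcaFind]; simp [hlen, hv]
      simp only [hg, hv, beq_self_eq_true, if_true]
      rw [hfuel, marcaBest_some ref (n.length - i) hf]
      have hrest : n.length + 1 - (i + 1) = n.length - i := by omega
      by_cases hc : (i : Int) - ref > f0 - i0
      · simp only [hc, if_pos]
        rw [hstep, marca_main n (i + 1) (i : Int) ref (i : Int) (by omega), hrest]
        split_ifs <;> first | rfl | (exfalso; omega)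
      · simp only [hc, reduceIte]
        rw [hstep, marca_main n (i + 1) (i : Int) i0 f0 h0, hrest]
        split_ifs <;> first | rfl | (exfalso; omega)
    · have hswap : marcaFind n i (n.length - i) = marcaFind n (i + 1) (n.length - (i + 1)) := by
        rw [hfind, marcaFind]; simp [hlen, hv]
      have hv' : (PySem.List.pyGetD n (i : Int) "" == "1") = false := by simp [hg, hv]
      simp only [hv', Bool.false_eq_true, if_false]
      rw [hstep, marca_main n (i + 1) ref i0 f0 h0]
      have hBeq : marcaBest n i ref (n.length + 1 - i)
          = marcaBest n (i + 1) ref (n.length + 1 - (i + 1)) := by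
        have hfuel' : n.length + 1 - (i + 1) = (n.length - (i + 1)) + 1 := by omega
        cases hcase : marcaFind n (i + 1) (n.length - (i + 1)) with
        | none =>
            rw [hfuel, hfuel', marcaBest_none ref _ (hswap.trans hcase),
              marcaBest_none ref _ hcase]
        | some j =>
            have hb := marcaFind_bounds n (i + 1) _ j hcase
            rw [hfuel, hfuel', marcaBest_some ref _ (hswap.trans hcase),
              marcaBest_some ref _ hcase,
              marcaBest_fuel n (j + 1) (j : Int) (n.length - i) (n.length - (i + 1))
                (by omega) (by omega)]
      rw [hBeq]
  · have hnil : marcaBest n i ref (n.length + 1 - i) = (ref, ref) := by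
      cases hf2 : n.length + 1 - i with
      | zero => rfl
      | succ k =>
          exact marcaBest_none ref k
            (marcaFind_none_of_le n i (n.length - i) (Nat.le_of_not_lt hlen))
    rw [PySem.List.pyRange_one_eq_nil (by exact_mod_cast Nat.le_of_not_lt hlen), hnil]
    simp only [List.foldl_nil]
    split_ifs <;> first | rfl | (exfalso; omega)
termination_by n.length - i

-- with start ref = 0 the guard against the initial (0,0) is vacuous
theorem marcaBest_zero_if (n : List String) :
    (if (marcaBest n 0 0 (n.length + 1)).2 - (marcaBest n 0 0 (n.length + 1)).1 > 0
     then marcaBest n 0 0 (n.length + 1) else ((0 : Int), (0 : Int)))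
    = marcaBest n 0 0 (n.length + 1) := by
  cases hcase : marcaFind n 0 (n.length - 0) with
  | none => rw [marcaBest_none 0 n.length hcase]; simp
  | some j =>
      rw [marcaBest_some 0 n.length hcase]
      have hj : (0 : Int) ≤ (j : Int) := Int.natCast_nonneg j
      split_ifs <;>
        first
          | rfl
          | (exfalso; omega)
          | (refine Prod.ext ?_ ?_ <;> simp <;> omega)

-- ===== VERDICT (by name: the statement is the Claim_ definition above) =====
theorem marca_spec : Claim_equal_marca := by
  intro n _ _
  show marca n = marca_alt n
  simp only [marca, marca_alt]
  have h := marca_main n 0 0 0 0 le_rfl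
  simp only [Nat.cast_zero, sub_zero, Nat.sub_zero] at h
  rw [h, marcaBest_zero_if, Int.add_comm]
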